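-- pv_equiv track=rewrite | github.com/chrisnadhe/Loom | app/services/data_processor.py | _validate_hostnames
-- ===== SOURCE A (Python) =====
-- def _validate_hostnames(data: list[dict]) -> list[dict]:
--     """
--     Light validation: only check that hostname is present and unique.
--     Returning per-row error dicts (empty dict = no errors for that row).
--     """
--     results: list[dict] = []
--     seen: set[str] = set()
--
--     for row in data:
--         errors: dict[str, str] = {}
--         hostname = str(row.get("hostname", "")).strip()
--
--         if not hostname:
--             errors["hostname"] = "Hostname is required"
--         elif hostname in seen:
--             errors["hostname"] = f"Duplicate hostname: {hostname}"
--         seen.add(hostname)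
--
--         results.append(errors)
--
--     return results
-- ===== SOURCE B (Python) =====
-- def _validate_hostnames(data: list[dict]) -> list[dict]:
--     """Two-pass variant: precompute a first-occurrence index table, then emit per-row errors."""
--     hostnames = [str(row.get("hostname", "")).strip() for row in data]
--     first: dict[str, int] = {}
--     for i, h in enumerate(hostnames):
--         if h and h not in first:
--             first[h] = i
--     results: list[dict] = []
--     for i, h in enumerate(hostnames):
--         if not h:
--             results.append({"hostname": "Hostname is required"})
--         elif first[h] != i:
--             results.append({"hostname": f"Duplicate hostname: {h}"})
--         else:
--             results.append({})
--     return results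
-- ===== Notes on version B (the rewrite author's own statement) =====
-- stated objective: alternative
-- what changed: Replaces the single pass with an incrementally-maintained 'seen' set by two passes: a precomputed first-occurrence index dict over the normalized hostnames, then an emit pass that flags a row as duplicate when the table's first index differs from the row's own index.
import Mathlib
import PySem

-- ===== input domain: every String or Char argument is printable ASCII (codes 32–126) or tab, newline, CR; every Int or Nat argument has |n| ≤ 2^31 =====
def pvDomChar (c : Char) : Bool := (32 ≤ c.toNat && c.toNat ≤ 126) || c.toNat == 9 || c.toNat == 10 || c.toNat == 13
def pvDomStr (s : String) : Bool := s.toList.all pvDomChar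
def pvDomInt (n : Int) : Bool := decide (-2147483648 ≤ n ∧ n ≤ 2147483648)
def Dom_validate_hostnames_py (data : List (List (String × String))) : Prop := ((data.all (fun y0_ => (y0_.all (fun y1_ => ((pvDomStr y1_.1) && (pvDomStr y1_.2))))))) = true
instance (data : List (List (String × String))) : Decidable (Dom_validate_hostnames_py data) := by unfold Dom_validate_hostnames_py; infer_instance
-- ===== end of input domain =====

-- B replaces A's incremental 'seen' set with a precomputed first-occurrence index table
-- consulted in a second pass (alternative decomposition, same cost).


-- ===== PORT A =====
-- hostname = str(row.get("hostname", "")).strip()   (values are already str, so str() is identity)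
def pvNorm (row : List (String × String)) : String :=
  PySem.Str.strip (PySem.Dict.getD (PySem.Dict.mk row) "hostname" "")

-- the 'for row in data' loop, carrying (seen); appends one error dict per row
def pvLoopA : List (List (String × String)) → PySem.Set String → List (List (String × String))
  | [], _ => []
  | row :: rest, seen =>
    let hostname := pvNorm row
    let errors : List (String × String) :=
      if hostname = "" then [("hostname", "Hostname is required")]
      else if PySem.Set.contains seen hostname then
        [("hostname", "Duplicate hostname: " ++ hostname)]
      else []
    errors :: pvLoopA rest (PySem.Set.add seen hostname)

def validate_hostnames_py (data : List (List (String × String))) : List (List (String × String)) :=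
  pvLoopA data PySem.Set.empty

-- ===== PORT B =====
-- first pass: first[h] = i for the first occurrence of each non-empty normalized hostname
def pvBuildFirst : List String → Nat → PySem.Dict String Nat → PySem.Dict String Nat
  | [], _, first => first
  | h :: rest, i, first =>
    pvBuildFirst rest (i + 1)
      (if h ≠ "" ∧ first.contains h = false then first.insert h i else first)

-- second pass: emit the per-row error dict from the table
def pvEmit (first : PySem.Dict String Nat) : List String → Nat → List (List (String × String))
  | [], _ => []
  | h :: rest, i =>
    (if h = "" then [("hostname", "Hostname is required")]
     else if first.get? h ≠ some i then [("hostname", "Duplicate hostname: " ++ h)]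
     else []) :: pvEmit first rest (i + 1)

def validate_hostnames_py_alt (data : List (List (String × String))) : List (List (String × String)) :=
  let hostnames := data.map pvNorm
  let first := pvBuildFirst hostnames 0 PySem.Dict.empty
  pvEmit first hostnames 0

-- ===== PRECONDITION & SPEC =====
def Spec_validate_hostnames_py (data : List (List (String × String))) (out : List (List (String × String))) : Prop := out = validate_hostnames_py_alt data
instance (data : List (List (String × String))) (out : List (List (String × String))) : Decidable (Spec_validate_hostnames_py data out) := by unfold Spec_validate_hostnames_py; infer_instance

-- ===== CLAIM (what is proved, stated in full; the proofs are below) =====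
def Claim_equal_validate_hostnames_py : Prop := ∀ (data : List (List (String × String))), Dom_validate_hostnames_py data → Spec_validate_hostnames_py data (validate_hostnames_py data)

-- ===== LEMMAS AND PROOFS =====

-- index of the first occurrence of h in the list, counting from i (proof helper)
def pvFirstAt : List String → Nat → String → Option Nat
  | [], _, _ => none
  | x :: t, i, h => if x = h then some i else pvFirstAt t (i + 1) h

-- A's loop depends on the rows only through their normalized hostnames
def pvLoopA' : List String → PySem.Set String → List (List (String × String))
  | [], _ => []
  | h :: rest, seen =>
    (if h = "" then [("hostname", "Hostname is required")]
     else if PySem.Set.contains seen h then [("hostname", "Duplicate hostname: " ++ h)]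
     else []) :: pvLoopA' rest (PySem.Set.add seen h)

theorem pvLoopA_eq_loopA' (rows : List (List (String × String))) (seen : PySem.Set String) :
    pvLoopA rows seen = pvLoopA' (rows.map pvNorm) seen := by
  induction rows generalizing seen with
  | nil => rfl
  | cons row rest ih => simp [pvLoopA, pvLoopA', ih]

theorem pvBuildFirst_get (hs : List String) (i : Nat) (d : PySem.Dict String Nat)
    (h : String) (hne : h ≠ "") :
    (pvBuildFirst hs i d).get? h = ((d.get? h).orElse (fun _ => pvFirstAt hs i h)) := by
  induction hs generalizing i d with
  | nil => cases hd : d.get? h <;> simp [pvBuildFirst, pvFirstAt, hd, Option.orElse]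
  | cons x t ih =>
    simp only [pvBuildFirst]
    by_cases hx : x = h
    · subst hx
      rcases hd : d.get? x with _ | v
      · have hc : d.contains x = false := by
          rw [PySem.Dict.contains_eq_isSome_get?, hd]; rfl
        simp only [hne, hc, and_true, ne_eq, not_false_iff, if_pos, ih,
          PySem.Dict.get?_insert_self, pvFirstAt]
        simp [Option.orElse]
      · have hc : d.contains x = true := by
          rw [PySem.Dict.contains_eq_isSome_get?, hd]; rfl
        simp only [hc, Bool.true_eq_false, and_false, ih]
        simp [hd, Option.orElse]
    · have hget : ∀ v, ((d.insert x v).get? h) = d.get? h := fun v =>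
        PySem.Dict.get?_insert_of_ne _ _ (fun hh => hx hh.symm)
      by_cases hxe : x ≠ "" ∧ d.contains x = false
      · simp only [if_pos hxe, ih, hget, pvFirstAt, if_neg hx]
      · simp only [if_neg hxe, ih, pvFirstAt, if_neg hx]

theorem pvFirstAt_append_self (pre t : List String) (h : String) (i : Nat) :
    pvFirstAt (pre ++ h :: t) i h =
      if h ∈ pre then pvFirstAt pre i h else some (i + pre.length) := by
  induction pre generalizing i with
  | nil => simp [pvFirstAt]
  | cons x p ih =>
    by_cases hx : x = h
    · subst hx; simp [pvFirstAt]
    · simp only [List.cons_append, pvFirstAt, if_neg hx, ih, List.mem_cons,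
        List.length_cons]
      by_cases hm : h ∈ p
      · simp [hm, Ne.symm hx]
      · simp [hm, Ne.symm hx]; omega

theorem pvFirstAt_lt (pre : List String) (h : String) (i : Nat) (hm : h ∈ pre) :
    ∃ j, pvFirstAt pre i h = some j ∧ j < i + pre.length := by
  induction pre generalizing i with
  | nil => cases hm
  | cons x p ih =>
    by_cases hx : x = h
    · refine ⟨i, by simp [pvFirstAt, hx], ?_⟩
      simp only [List.length_cons]; omega
    · have hm' : h ∈ p := by
        rcases List.mem_cons.mp hm with h1 | h1
        · exact absurd h1.symm hx
        · exact h1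
      obtain ⟨j, hj, hlt⟩ := ih (i + 1) hm'
      refine ⟨j, by simp [pvFirstAt, hx, hj], ?_⟩
      simp only [List.length_cons]; omega

theorem pvContains_ofList (pre : List String) (h : String) :
    PySem.Set.contains (PySem.Set.ofList pre) h = true ↔ h ∈ pre := by
  simp [PySem.Set.contains, PySem.Set.mem_ofList]

theorem pvMain (suffix pre : List String) :
    pvLoopA' suffix (PySem.Set.ofList pre) =
      pvEmit (pvBuildFirst (pre ++ suffix) 0 PySem.Dict.empty) suffix pre.length := by
  induction suffix generalizing pre with
  | nil => rfl
  | cons h t ih =>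
    simp only [pvLoopA', pvEmit]
    refine congrArg₂ List.cons ?_ ?_
    · by_cases he : h = ""
      · simp [he]
      · simp only [if_neg he]
        rw [pvBuildFirst_get _ _ _ _ he, PySem.Dict.get?_empty]
        simp only [Option.orElse, pvFirstAt_append_self]
        by_cases hm : h ∈ pre
        · obtain ⟨j, hj, hlt⟩ := pvFirstAt_lt pre h 0 hm
          have : pvFirstAt pre 0 h ≠ some pre.length := by
            rw [hj]; intro hc; injection hc with hc; omega
          simp [hm, hj]
          intro hc; omega
        · have : PySem.Set.contains (PySem.Set.ofList pre) h ≠ true := by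
            intro hc; exact hm ((pvContains_ofList pre h).mp hc)
          simp [hm]
    · have hadd : PySem.Set.add (PySem.Set.ofList pre) h = PySem.Set.ofList (pre ++ [h]) :=
        (PySem.Set.ofList_append_singleton pre h).symm
      have := ih (pre ++ [h])
      rw [hadd, this]
      simp [List.append_assoc]

-- ===== VERDICT (by name: the statement is the Claim_ definition above) =====
theorem validate_hostnames_py_spec : Claim_equal_validate_hostnames_py := by
  intro data _
  show validate_hostnames_py data = validate_hostnames_py_alt data
  unfold validate_hostnames_py validate_hostnames_py_alt
  rw [pvLoopA_eq_loopA']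
  have := pvMain (data.map pvNorm) []
  simpa [PySem.Set.ofList] using this
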